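-- pv_equiv track=rewrite | github.com/benwatson528/advent-of-code-15 | main/day11/corporate_policy.py | contains_two_pairs
-- ===== SOURCE A (Python) =====
-- def contains_two_pairs(password):
--     seen = None
--     for i in range(1, len(password)):
--         if password[i - 1] == password[i]:
--             if seen and password[i] != seen:
--                 return True
--             else:
--                 seen = password[i]
--     return False
-- ===== SOURCE B (Python) =====
-- def contains_two_pairs(password):
--     # Stage 1: run-length encode the password into (letter, run_length) pairs.
--     runs = []
--     for ch in password:
--         if runs and runs[-1][0] == ch:
--             runs[-1] = (ch, runs[-1][1] + 1)
--         else: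
--             runs.append((ch, 1))
--     # Stage 2: letters of runs of length >= 2 are exactly the adjacent-pair letters.
--     letters = [c for c, n in runs if n >= 2]
--     # Stage 3: two distinct pair letters exist iff some letter differs from the first.
--     return any(c != letters[0] for c in letters)
-- ===== Notes on version B (the rewrite author's own statement) =====
-- stated objective: alternative
-- what changed: Replaces the single-pass early-return state machine tracking one last pair letter by a staged pipeline: run-length encode the string into (letter, count) runs, project out letters of runs of length >= 2, and test whether any of them differs from the first.
import Mathlib
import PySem

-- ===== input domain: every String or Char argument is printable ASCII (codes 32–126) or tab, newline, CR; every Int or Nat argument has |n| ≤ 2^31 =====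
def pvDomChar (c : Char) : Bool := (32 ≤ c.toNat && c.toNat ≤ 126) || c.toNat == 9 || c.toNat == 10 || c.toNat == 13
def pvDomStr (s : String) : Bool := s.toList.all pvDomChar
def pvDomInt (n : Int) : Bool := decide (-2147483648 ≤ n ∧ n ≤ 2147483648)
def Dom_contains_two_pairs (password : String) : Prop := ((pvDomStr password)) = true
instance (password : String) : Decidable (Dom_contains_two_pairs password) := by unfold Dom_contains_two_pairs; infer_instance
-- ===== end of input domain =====

-- B replaces A's early-return state machine by a staged pipeline: run-length
-- encode, keep letters of runs of length >= 2, compare them against the first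
-- (objective: alternative).

-- ===== PORT A =====
-- the for-loop with early return, as structural recursion over the index list
def cpGoA (cs : List Char) (idxs : List Int) (seen : Option Char) : Bool :=
  match idxs with
  | [] => false
  | i :: rest =>
    if PySem.List.pyGet? cs (i - 1) == PySem.List.pyGet? cs i then
      match PySem.List.pyGet? cs i, seen with
      | some x, some c => if x != c then true else cpGoA cs rest (some x)
      | some x, none => cpGoA cs rest (some x)
      | none, _ => cpGoA cs rest seen
    else cpGoA cs rest seen

def contains_two_pairs (password : String) : Bool :=
  cpGoA password.toList (PySem.List.pyRange 1 (password.toList.length : Int) 1) none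

-- ===== PORT B =====
-- one step of stage 1: extend the last run or append a fresh one
def cpPushRun : List (Char × Int) → Char → List (Char × Int)
  | [], ch => [(ch, 1)]
  | [(c, n)], ch => if c == ch then [(c, n + 1)] else [(c, n), (ch, 1)]
  | r :: s :: rest, ch => r :: cpPushRun (s :: rest) ch

-- stage 2: letters of runs of length >= 2
def cpLetters (runs : List (Char × Int)) : List Char :=
  (runs.filter (fun p => decide ((2 : Int) ≤ p.2))).map Prod.fst

-- stage 3: any(c != letters[0] for c in letters)
def cpAns (letters : List Char) : Bool :=
  match letters with
  | [] => false
  | c0 :: _ => letters.any (fun c => c != c0)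

def contains_two_pairs_alt (password : String) : Bool :=
  cpAns (cpLetters (password.toList.foldl cpPushRun []))

-- ===== PRECONDITION & SPEC =====
def Spec_contains_two_pairs (password : String) (out : Bool) : Prop := out = contains_two_pairs_alt password
instance (password : String) (out : Bool) : Decidable (Spec_contains_two_pairs password out) := by unfold Spec_contains_two_pairs; infer_instance

-- ===== CLAIM (what is proved, stated in full; the proofs are below) =====
def Claim_equal_contains_two_pairs : Prop := ∀ (password : String), Dom_contains_two_pairs password → Spec_contains_two_pairs password (contains_two_pairs password)

-- ===== LEMMAS AND PROOFS =====

-- cpPushRun seen from the back: push on the reversed run list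
def rpush : List (Char × Int) → Char → List (Char × Int)
  | [], ch => [(ch, 1)]
  | (c, n) :: rs, ch => if c == ch then (c, n + 1) :: rs else (ch, 1) :: (c, n) :: rs

-- A's loop as a structural scan over (previous char, rest, seen)
def scanA : Char → List Char → Option Char → Bool
  | _, [], _ => false
  | a, b :: rest, seen =>
    if a == b then
      match seen with
      | some c => if b != c then true else scanA b rest (some b)
      | none => scanA b rest (some b)
    else scanA b rest seen

theorem rpush_append_last (l : List (Char × Int)) (hl : l ≠ []) (r : Char × Int) (ch : Char) :
    rpush (l ++ [r]) ch = rpush l ch ++ [r] := by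
  cases l with
  | nil => exact absurd rfl hl
  | cons x xs =>
    obtain ⟨c, n⟩ := x
    simp only [List.cons_append, rpush]
    split <;> simp

theorem push_rev (runs : List (Char × Int)) (ch : Char) :
    cpPushRun runs ch = (rpush runs.reverse ch).reverse := by
  induction runs with
  | nil => simp [cpPushRun, rpush]
  | cons r tail ih =>
    cases tail with
    | nil =>
      obtain ⟨c, n⟩ := r
      simp only [cpPushRun, List.reverse_cons, List.reverse_nil, List.nil_append, rpush]
      by_cases h : (c == ch) = true <;> simp [h]
    | cons s rest =>
      rw [List.reverse_cons, rpush_append_last _ (by simp) r ch, List.reverse_append, ← ih]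
      rfl

theorem foldl_rev (cs : List Char) : ∀ (runs : List (Char × Int)),
    cs.foldl cpPushRun runs = (cs.foldl rpush runs.reverse).reverse := by
  induction cs with
  | nil => intro runs; simp
  | cons c cs ih =>
    intro runs
    simp only [List.foldl_cons]
    rw [ih, push_rev, List.reverse_reverse]

theorem letters_reverse (rr : List (Char × Int)) :
    cpLetters rr.reverse = (cpLetters rr).reverse := by
  simp [cpLetters]

-- letters of a run list headed by (a, n)
theorem letters_cons (a : Char) (n : Int) (rs : List (Char × Int)) :
    cpLetters ((a, n) :: rs) = if (2 : Int) ≤ n then a :: cpLetters rs else cpLetters rs := by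
  by_cases h : (2 : Int) ≤ n
  · simp [cpLetters, h]
  · simp [cpLetters, h]

theorem cpAns_iff (ls : List Char) :
    cpAns ls = true ↔ ∃ x ∈ ls, ∃ y ∈ ls, x ≠ y := by
  cases ls with
  | nil => simp [cpAns]
  | cons c0 tl =>
    simp only [cpAns, List.any_eq_true, bne_iff_ne, ne_eq]
    constructor
    · rintro ⟨c, hc, hne⟩
      exact ⟨c, hc, c0, by simp, hne⟩
    · rintro ⟨x, hx, y, hy, hxy⟩
      by_cases hx0 : x = c0
      · exact ⟨y, hy, fun h => hxy (hx0.trans h.symm)⟩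
      · exact ⟨x, hx, hx0⟩

theorem cpAns_reverse (ls : List Char) : cpAns ls.reverse = cpAns ls := by
  rw [Bool.eq_iff_iff, cpAns_iff, cpAns_iff]
  simp

theorem cpAns_const (ls : List Char) (c : Char) (h : ∀ x ∈ ls, x = c) :
    cpAns ls = false := by
  cases hb : cpAns ls
  · rfl
  · exfalso
    obtain ⟨x, hx, y, hy, hxy⟩ := (cpAns_iff ls).mp hb
    exact hxy ((h x hx).trans (h y hy).symm)

theorem mem_letters_rpush (rr : List (Char × Int)) (ch x : Char)
    (h : x ∈ cpLetters rr) : x ∈ cpLetters (rpush rr ch) := by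
  cases rr with
  | nil => simp [cpLetters] at h
  | cons r rs =>
    obtain ⟨c, n⟩ := r
    rw [letters_cons] at h
    by_cases hc : (c == ch) = true
    · simp only [rpush, if_pos hc, letters_cons]
      by_cases h1 : (2 : Int) ≤ n
      · rw [if_pos h1] at h
        rw [if_pos (by omega)]
        exact h
      · rw [if_neg h1] at h
        split_ifs
        · exact List.mem_cons_of_mem _ h
        · exact h
    · simp only [rpush, if_neg hc, letters_cons]
      rw [if_neg (by omega)]
      exact h

theorem mem_letters_foldl (cs : List Char) : ∀ (rr : List (Char × Int)) (x : Char),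
    x ∈ cpLetters rr → x ∈ cpLetters (cs.foldl rpush rr) := by
  induction cs with
  | nil => intro rr x h; simpa using h
  | cons c cs ih =>
    intro rr x h
    exact ih (rpush rr c) x (mem_letters_rpush rr c x h)

-- main invariant: A's scan from state (a, seen) equals B's verdict on the
-- final run list grown from (a, n) :: rs
theorem cpMain (rest : List Char) : ∀ (a : Char) (seen : Option Char) (n : Int) (rs : List (Char × Int)),
    1 ≤ n →
    (match seen with
     | none => cpLetters ((a, n) :: rs) = []
     | some c => cpLetters ((a, n) :: rs) ≠ [] ∧ ∀ x ∈ cpLetters ((a, n) :: rs), x = c) →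
    scanA a rest seen = cpAns (cpLetters (rest.foldl rpush ((a, n) :: rs))) := by
  induction rest with
  | nil =>
    intro a seen n rs hn hinv
    simp only [List.foldl_nil, scanA]
    cases seen with
    | none => rw [hinv]; rfl
    | some c => exact (cpAns_const _ c hinv.2).symm
  | cons b rest ih =>
    intro a seen n rs hn hinv
    simp only [List.foldl_cons]
    by_cases hab : (a == b) = true
    · have hab' : a = b := eq_of_beq hab
      subst hab'
      have hpush : rpush ((a, n) :: rs) a = (a, n + 1) :: rs := by
        simp [rpush]
      rw [hpush]
      have hlnew : cpLetters ((a, n + 1) :: rs) = a :: cpLetters rs := by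
        rw [letters_cons, if_pos (by omega)]
      have hsub : ∀ x, x ∈ cpLetters ((a, n) :: rs) → x ∈ cpLetters ((a, n + 1) :: rs) := by
        intro x hx
        rw [letters_cons] at hx
        rw [hlnew]
        split_ifs at hx with h1
        · exact hx
        · exact List.mem_cons_of_mem _ hx
      cases seen with
      | none =>
        have hrs : cpLetters rs = [] := by
          rw [letters_cons] at hinv
          split_ifs at hinv with h2
          · exact absurd hinv (by simp)
          · exact hinv
        have hstep : scanA a (a :: rest) none = scanA a rest (some a) := by
          simp [scanA]
        rw [hstep]
        exact ih a (some a) (n + 1) rs (by omega)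
          (by rw [hlnew, hrs]; exact ⟨by simp, by simp⟩)
      | some c =>
        by_cases hbc : a = c
        · have hstep : scanA a (a :: rest) (some c) = scanA a rest (some a) := by
            simp [scanA, hbc]
          rw [hstep]
          refine ih a (some a) (n + 1) rs (by omega) ?_
          rw [hlnew]
          refine ⟨by simp, ?_⟩
          intro x hx
          rcases List.mem_cons.mp hx with h | h
          · exact h
          · have hxo : x ∈ cpLetters ((a, n) :: rs) := by
              rw [letters_cons]
              split_ifs
              · exact List.mem_cons_of_mem _ h
              · exact h
            rw [hinv.2 x hxo, hbc]
        · have hstep : scanA a (a :: rest) (some c) = true := by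
            simp [scanA, hbc]
          rw [hstep]
          -- B's final verdict is true: a and c are distinct letters of the final runs
          have hamem : a ∈ cpLetters ((a, n + 1) :: rs) := by
            rw [hlnew]; simp
          have hcmem : c ∈ cpLetters ((a, n + 1) :: rs) := by
            obtain ⟨y, hy⟩ := List.exists_mem_of_ne_nil _ hinv.1
            have hc : c ∈ cpLetters ((a, n) :: rs) := (hinv.2 y hy) ▸ hy
            exact hsub c hc
          exact ((cpAns_iff _).mpr
            ⟨a, mem_letters_foldl rest _ a hamem, c, mem_letters_foldl rest _ c hcmem, hbc⟩).symm
    · have hpush : rpush ((a, n) :: rs) b = (b, 1) :: (a, n) :: rs := by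
        simp [rpush, hab]
      rw [hpush]
      have hl1 : cpLetters ((b, 1) :: (a, n) :: rs) = cpLetters ((a, n) :: rs) := by
        rw [letters_cons, if_neg (by omega)]
      have hstep : scanA a (b :: rest) seen = scanA b rest seen := by
        cases seen <;> simp [scanA, hab]
      rw [hstep]
      refine ih b seen 1 ((a, n) :: rs) le_rfl ?_
      cases seen with
      | none => rw [hl1]; exact hinv
      | some c => rw [hl1]; exact hinv

-- A's index loop equals the structural scan
theorem cpA_scan (rest : List Char) : ∀ (pre : List Char) (a : Char) (seen : Option Char),
    cpGoA (pre ++ a :: rest)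
      (PySem.List.pyRange ((pre.length : Int) + 1) (((pre ++ a :: rest).length : Int)) 1) seen
      = scanA a rest seen := by
  induction rest with
  | nil =>
    intro pre a seen
    have hlen : (((pre ++ [a]).length : Int)) = (pre.length : Int) + 1 := by
      simp
    rw [hlen, PySem.List.pyRange_one_eq_nil le_rfl]
    rfl
  | cons b rest ih =>
    intro pre a seen
    have hlt : (pre.length : Int) + 1 < ((pre ++ a :: b :: rest).length : Int) := by
      simp
    rw [PySem.List.pyRange_one_cons hlt]
    have hga : PySem.List.pyGet? (pre ++ a :: b :: rest) ((pre.length : Int) + 1 - 1) = some a := by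
      have h1 : ((pre.length : Int) + 1 - 1) = ((pre.length : Nat) : Int) := by ring
      rw [h1, PySem.List.pyGet?_natCast]
      rw [List.getElem?_append_right le_rfl]
      simp
    have hgb : PySem.List.pyGet? (pre ++ a :: b :: rest) ((pre.length : Int) + 1) = some b := by
      have h1 : ((pre.length : Int) + 1) = (((pre.length + 1 : Nat)) : Int) := by push_cast; ring
      rw [h1, PySem.List.pyGet?_natCast]
      rw [List.getElem?_append_right (by omega)]
      simp
    have hih : cpGoA (pre ++ a :: b :: rest)
        (PySem.List.pyRange ((pre.length : Int) + 1 + 1) (((pre ++ a :: b :: rest).length : Int)) 1)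
        = fun s => scanA b rest s := by
      funext s
      have h2 : pre ++ a :: b :: rest = (pre ++ [a]) ++ b :: rest := by simp
      have h3 : ((pre.length : Int) + 1 + 1) = (((pre ++ [a]).length : Int) + 1) := by
        simp
      rw [h3, h2, ih (pre ++ [a]) b s]
    simp only [cpGoA, hga, hgb, hih, Option.some_beq_some]
    cases seen <;> simp only [scanA]

-- ===== VERDICT (by name: the statement is the Claim_ definition above) =====
theorem contains_two_pairs_spec : Claim_equal_contains_two_pairs := by
  intro password _
  unfold Spec_contains_two_pairs contains_two_pairs contains_two_pairs_alt
  cases hcs : password.toList with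
  | nil =>
    rw [PySem.List.pyRange_one_eq_nil (by simp)]
    rfl
  | cons a rest =>
    have hA : cpGoA (a :: rest) (PySem.List.pyRange 1 ((a :: rest).length : Int) 1) none
        = scanA a rest none := by
      have := cpA_scan rest [] a none
      simpa using this
    rw [hA]
    have hB : (a :: rest).foldl cpPushRun [] = (rest.foldl rpush [(a, 1)]).reverse := by
      rw [List.foldl_cons]
      have h1 : cpPushRun [] a = [(a, 1)] := rfl
      rw [h1, foldl_rev]
      rfl
    rw [hB, letters_reverse, cpAns_reverse]
    exact cpMain rest a none 1 [] le_rfl (by simp [cpLetters])
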